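-- pv_equiv track=rewrite | github.com/YiseBoge/CompetitiveProgramming | CodeForce/Contest/A2SV Custom Contests/A2SV12/G.py | label_graph
-- ===== SOURCE A (Python) =====
-- def label_graph(words, k):
--     trie = {}
--     for word in words:
--         node = trie
--         for w in word:
--             if w not in node:
--                 node[w] = {}
--             node = node[w]
--
--     def can_do(current, bad_result):
--         for key, new in current.items():
--             if not can_do(new, bad_result):
--                 return True
--         return False if current else bad_result
--
--     can_win, can_lose = can_do(trie, False), can_do(trie, True)
--     if can_win == can_lose:
--         return "First" if can_win else "Second"
--     if can_lose:
--         return "Second"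
--     return "First" if k % 2 else "Second"
-- ===== SOURCE B (Python) =====
-- def label_graph(words, k):
--     # One post-order DFS over suffix lists: partition by first character,
--     # return (can_win, can_lose) in a single pass (no explicit trie).
--     def solve(suffixes):
--         firsts = []
--         for s in suffixes:
--             if s and s[0] not in firsts:
--                 firsts.append(s[0])
--         if not firsts:
--             return (False, True)
--         results = [solve([s[1:] for s in suffixes if s and s[0] == c]) for c in firsts]
--         win = any(not cw for cw, _ in results)
--         lose = any(not cl for _, cl in results)
--         return (win, lose)
--
--     can_win, can_lose = solve(list(words))
--     if can_win == can_lose: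
--         return "First" if can_win else "Second"
--     if can_lose:
--         return "Second"
--     return "First" if k % 2 else "Second"
-- ===== Notes on version B (the rewrite author's own statement) =====
-- stated objective: alternative
-- what changed: B drops A's explicit nested-dict trie and its two separate can_do traversals, instead running a single post-order DFS that partitions the suffix lists by first character and returns the (can_win, can_lose) pair in one pass.
import Mathlib
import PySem

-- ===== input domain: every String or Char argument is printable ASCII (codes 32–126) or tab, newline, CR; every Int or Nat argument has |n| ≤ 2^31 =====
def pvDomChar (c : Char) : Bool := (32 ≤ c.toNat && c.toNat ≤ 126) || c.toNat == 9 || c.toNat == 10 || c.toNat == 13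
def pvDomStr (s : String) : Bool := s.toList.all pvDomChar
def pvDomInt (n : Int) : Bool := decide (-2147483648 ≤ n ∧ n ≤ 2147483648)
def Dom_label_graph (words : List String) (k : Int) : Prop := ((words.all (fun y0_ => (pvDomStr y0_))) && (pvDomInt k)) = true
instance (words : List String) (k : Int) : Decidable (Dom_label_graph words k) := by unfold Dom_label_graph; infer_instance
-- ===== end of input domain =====

-- B replaces A's explicit nested-dict trie plus two separate can_do traversals with a
-- single post-order DFS over suffix lists (partition by first character) that returns
-- the (win, lose) pair in one pass; objective: alternative (no speed claim).

-- ===== PORT A =====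
-- Python's nested dict trie, encoded as a mutual pair (a nested inductive is not allowed).
mutual
inductive PyTrie where
  | mk : PyChildren → PyTrie
inductive PyChildren where
  | nil : PyChildren
  | cons : Char → PyTrie → PyChildren → PyChildren
end

-- 'node = trie; for w in word: if w not in node: node[w] = {}; node = node[w]'
-- (functional rendering of the in-place dict updates; insertion order preserved)
mutual
def insertT : PyTrie → List Char → PyTrie
  | t, [] => t
  | .mk ch, c :: cs => .mk (updateChild ch c cs)
termination_by t cs => (cs.length, 0)
decreasing_by all_goals ((first | apply Prod.Lex.right | apply Prod.Lex.left) <;> simp <;> omega)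
def updateChild : PyChildren → Char → List Char → PyChildren
  | .nil, c, cs => .cons c (insertT (.mk .nil) cs) .nil
  | .cons c' t rest, c, cs =>
      if c' = c then .cons c' (insertT t cs) rest
      else .cons c' t (updateChild rest c cs)
termination_by ch c cs => (cs.length, 1 + sizeOf ch)
decreasing_by all_goals ((first | apply Prod.Lex.right | apply Prod.Lex.left) <;> simp <;> omega)
end

-- 'def can_do(current, bad_result): for key, new in current.items():
--    if not can_do(new, bad_result): return True
--  return False if current else bad_result'
mutual
def canDo : PyTrie → Bool → Bool
  | .mk .nil, bad => bad
  | .mk ch, bad => anyNot ch bad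
def anyNot : PyChildren → Bool → Bool
  | .nil, _ => false
  | .cons _ t rest, bad => if !canDo t bad then true else anyNot rest bad
end

def label_graph (words : List String) (k : Int) : String :=
  let trie := words.foldl (fun t w => insertT t w.toList) (.mk .nil)
  let can_win := canDo trie false
  let can_lose := canDo trie true
  if can_win = can_lose then (if can_win then "First" else "Second")
  else if can_lose then "Second"
  else if PySem.Int.mod k 2 ≠ 0 then "First" else "Second"

-- ===== PORT B =====
def totalLen (l : List (List Char)) : Nat := (l.map List.length).sum

-- '[s[1:] for s in suffixes if s and s[0] == c]'
def tailsFor (suffixes : List (List Char)) (c : Char) : List (List Char) :=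
  suffixes.filterMap (fun s => match s with
    | [] => none
    | c' :: rest => if c' == c then some rest else none)

-- 'firsts = []; for s in suffixes: if s and s[0] not in firsts: firsts.append(s[0])'
def firstsOf (suffixes : List (List Char)) : List Char :=
  suffixes.foldl (fun acc s => match s with
    | [] => acc
    | c :: _ => if c ∈ acc then acc else acc ++ [c]) []

lemma totalLen_tailsFor_le (ws : List (List Char)) (c : Char) :
    totalLen (tailsFor ws c) ≤ totalLen ws := by
  induction ws with
  | nil => simp [tailsFor, totalLen]
  | cons s ws ih =>
      cases s with
      | nil =>
          simp only [tailsFor, List.filterMap_cons, totalLen, List.map_cons, List.sum_cons] at *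
          omega
      | cons c' rest =>
          by_cases h : c' == c <;>
            simp only [tailsFor, List.filterMap_cons, h, totalLen, List.map_cons,
              List.sum_cons, List.length_cons, if_pos, if_neg, Bool.false_eq_true, not_false_iff] at * <;>
            omega

lemma mem_firstsOf (ws : List (List Char)) (c : Char) :
    c ∈ firstsOf ws ↔ ∃ rest, (c :: rest) ∈ ws := by
  have H : ∀ (ws : List (List Char)) (acc : List Char),
      c ∈ ws.foldl (fun acc s => match s with
        | [] => acc
        | c :: _ => if c ∈ acc then acc else acc ++ [c]) acc ↔
      c ∈ acc ∨ ∃ rest, (c :: rest) ∈ ws := by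
    intro ws
    induction ws with
    | nil => intro acc; simp
    | cons s ws ih =>
        intro acc
        cases s with
        | nil =>
            rw [List.foldl_cons]
            simp only [ih]
            constructor
            · rintro (hc | h); · exact Or.inl hc
              · exact Or.inr (by obtain ⟨r, hr⟩ := h; exact ⟨r, List.mem_cons_of_mem _ hr⟩)
            · rintro (hc | ⟨r, hr⟩); · exact Or.inl hc
              · rcases List.mem_cons.mp hr with he | hm
                · exact absurd he (by simp)
                · exact Or.inr ⟨r, hm⟩
        | cons c' rest =>
            rw [List.foldl_cons]
            by_cases h : c' ∈ acc
            · simp only [h, if_pos, ih]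
              constructor
              · rintro (hc | ⟨r, hr⟩); · exact Or.inl hc
                · exact Or.inr ⟨r, List.mem_cons_of_mem _ hr⟩
              · rintro (hc | ⟨r, hr⟩); · exact Or.inl hc
                · rcases List.mem_cons.mp hr with he | hm
                  · refine Or.inl ?_; injection he with h1 _; exact h1 ▸ h
                  · exact Or.inr ⟨r, hm⟩
            · simp only [h, if_neg, not_false_iff, ih, List.mem_append, List.mem_singleton]
              constructor
              · rintro ((hc | hc) | ⟨r, hr⟩); · exact Or.inl hc
                · exact Or.inr ⟨rest, by simp [hc]⟩
                · exact Or.inr ⟨r, List.mem_cons_of_mem _ hr⟩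
              · rintro (hc | ⟨r, hr⟩); · exact Or.inl (Or.inl hc)
                · rcases List.mem_cons.mp hr with he | hm
                  · injection he with h1 _
                    exact Or.inl (Or.inr h1)
                  · exact Or.inr ⟨r, hm⟩
  rw [firstsOf, H]; simp

lemma totalLen_tailsFor_lt (ws : List (List Char)) (c : Char)
    (h : c ∈ firstsOf ws) : totalLen (tailsFor ws c) < totalLen ws := by
  rw [mem_firstsOf] at h
  obtain ⟨rest, hmem⟩ := h
  induction ws with
  | nil => simp at hmem
  | cons s ws ih =>
      rcases List.mem_cons.mp hmem with he | hm
      · have hle := totalLen_tailsFor_le ws c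
        rw [← he]
        simp only [tailsFor, List.filterMap_cons, BEq.rfl, if_pos, totalLen,
          List.map_cons, List.sum_cons, List.length_cons] at *
        omega
      · have hlt := ih hm
        cases s with
        | nil =>
            simp only [tailsFor, List.filterMap_cons, totalLen, List.map_cons,
              List.sum_cons] at *
            omega
        | cons c' r =>
            by_cases hc : c' == c <;>
              simp only [tailsFor, List.filterMap_cons, hc, if_pos, if_neg,
                Bool.false_eq_true, not_false_iff, totalLen, List.map_cons,
                List.sum_cons, List.length_cons] at * <;>
              omega

-- single post-order DFS returning (can_win, can_lose)
def solve (suffixes : List (List Char)) : Bool × Bool :=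
  let firsts := firstsOf suffixes
  if firsts = [] then (false, true)
  else
    let results := firsts.attach.map (fun c => solve (tailsFor suffixes c.1))
    (results.any (fun r => !r.1), results.any (fun r => !r.2))
termination_by totalLen suffixes
decreasing_by exact totalLen_tailsFor_lt _ _ c.2

def label_graph_alt (words : List String) (k : Int) : String :=
  let r := solve (words.map String.toList)
  let can_win := r.1
  let can_lose := r.2
  if can_win = can_lose then (if can_win then "First" else "Second")
  else if can_lose then "Second"
  else if PySem.Int.mod k 2 ≠ 0 then "First" else "Second"

-- ===== PRECONDITION & SPEC =====
def Spec_label_graph (words : List String) (k : Int) (out : String) : Prop := out = label_graph_alt words k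
instance (words : List String) (k : Int) (out : String) : Decidable (Spec_label_graph words k out) := by unfold Spec_label_graph; infer_instance

-- ===== CLAIM (what is proved, stated in full; the proofs are below) =====
def Claim_equal_label_graph : Prop := ∀ (words : List String) (k : Int), Dom_label_graph words k → Spec_label_graph words k (label_graph words k)

-- ===== LEMMAS AND PROOFS =====
def trieOf (ws : List (List Char)) : PyTrie := ws.foldl insertT (.mk .nil)

def childrenToList : PyChildren → List (Char × PyTrie)
  | .nil => []
  | .cons c t rest => (c, t) :: childrenToList rest

def PyTrie.ch : PyTrie → PyChildren
  | .mk ch => ch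

-- assoc-list mirror of updateChild
def updAssoc (L : List (Char × PyTrie)) (c : Char) (cs : List Char) : List (Char × PyTrie) :=
  match L with
  | [] => [(c, insertT (.mk .nil) cs)]
  | (c', t) :: rest =>
      if c' = c then (c', insertT t cs) :: rest
      else (c', t) :: updAssoc rest c cs

theorem childrenToList_updateChild (ch : PyChildren) (c : Char) (cs : List Char) :
    childrenToList (updateChild ch c cs) = updAssoc (childrenToList ch) c cs := by
  cases ch with
  | nil => simp [updateChild, updAssoc, childrenToList]
  | cons c' t rest =>
      have ih := childrenToList_updateChild rest c cs
      by_cases h : c' = c <;> simp [updateChild, updAssoc, childrenToList, h, ih]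

lemma updAssoc_map_not_mem (firsts : List Char) (g : Char → PyTrie) (c : Char)
    (cs : List Char) (h : c ∉ firsts) :
    updAssoc (firsts.map (fun c' => (c', g c'))) c cs =
      firsts.map (fun c' => (c', g c')) ++ [(c, insertT (.mk .nil) cs)] := by
  induction firsts with
  | nil => simp [updAssoc]
  | cons c' fs ih =>
      have h1 : c' ≠ c := fun he => h (by simp [he])
      have h2 : c ∉ fs := fun hm => h (by simp [hm])
      simp [updAssoc, h1, ih h2]

lemma updAssoc_map_mem (firsts : List Char) (g : Char → PyTrie) (c : Char)
    (cs : List Char) (hnd : firsts.Nodup) (h : c ∈ firsts) :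
    updAssoc (firsts.map (fun c' => (c', g c'))) c cs =
      firsts.map (fun c' => (c', if c' = c then insertT (g c') cs else g c')) := by
  induction firsts with
  | nil => simp at h
  | cons c' fs ih =>
      rcases List.mem_cons.mp h with rfl | hm
      · simp only [List.map_cons, updAssoc, if_pos]
        refine congrArg (fun l => (c, insertT (g c) cs) :: l) ?_
        refine (List.map_congr_left ?_).symm
        intro x hx
        have hne : x ≠ c := fun he => (List.nodup_cons.mp hnd).1 (he ▸ hx)
        simp [hne]
      · have h1 : c' ≠ c := fun he => (List.nodup_cons.mp hnd).1 (he ▸ hm)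
        simp [updAssoc, h1, ih (List.nodup_cons.mp hnd).2 hm]

lemma nodup_firstsOf (ws : List (List Char)) : (firstsOf ws).Nodup := by
  have H : ∀ (ws : List (List Char)) (acc : List Char), acc.Nodup →
      (ws.foldl (fun acc s => match s with
        | [] => acc
        | c :: _ => if c ∈ acc then acc else acc ++ [c]) acc).Nodup := by
    intro ws
    induction ws with
    | nil => intro acc h; exact h
    | cons s ws ih =>
        intro acc h
        rw [List.foldl_cons]
        cases s with
        | nil => exact ih acc h
        | cons c _ =>
            by_cases hc : c ∈ acc
            · simpa [hc] using ih acc h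
            · simp only [hc, if_neg, not_false_iff]
              exact ih _ (by simp [List.nodup_append, h]; exact fun a ha he => hc (he ▸ ha))
  exact H ws [] List.nodup_nil

lemma firstsOf_snoc (ws : List (List Char)) (w : List Char) :
    firstsOf (ws ++ [w]) = (match w with
      | [] => firstsOf ws
      | c :: _ => if c ∈ firstsOf ws then firstsOf ws else firstsOf ws ++ [c]) := by
  simp [firstsOf, List.foldl_append]

lemma tailsFor_snoc (ws : List (List Char)) (w : List Char) (c : Char) :
    tailsFor (ws ++ [w]) c = tailsFor ws c ++ (match w with
      | [] => []
      | c' :: rest => if c' == c then [rest] else []) := by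
  cases w with
  | nil => simp [tailsFor, List.filterMap_append]
  | cons c' rest => by_cases h : c' = c <;> simp [tailsFor, List.filterMap_append, List.filterMap_cons, h]

lemma tailsFor_eq_nil_aux : ∀ (ws : List (List Char)) (c : Char),
    (∀ rest, (c :: rest) ∉ ws) → tailsFor ws c = [] := by
  intro ws c
  induction ws with
  | nil => intro _; rfl
  | cons s ws ih =>
      intro h
      have h' : ∀ rest, (c :: rest) ∉ ws := fun r hr => h r (List.mem_cons_of_mem _ hr)
      cases s with
      | nil => simpa [tailsFor, List.filterMap_cons] using ih h'
      | cons c' rest =>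
          have hne : c' ≠ c := fun he => h rest (by rw [he]; exact List.mem_cons_self)
          simpa [tailsFor, List.filterMap_cons, hne] using ih h'

lemma tailsFor_not_mem (ws : List (List Char)) (c : Char) (h : c ∉ firstsOf ws) :
    tailsFor ws c = [] := by
  rw [mem_firstsOf] at h
  push_neg at h
  exact tailsFor_eq_nil_aux ws c h

lemma trieOf_snoc (ws : List (List Char)) (w : List Char) :
    trieOf (ws ++ [w]) = insertT (trieOf ws) w := by
  simp [trieOf, List.foldl_append]

-- structure of the trie A builds: children in first-occurrence order, each child
-- built from the tails of the words starting with that character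
lemma children_trieOf (ws : List (List Char)) :
    childrenToList (trieOf ws).ch =
      (firstsOf ws).map (fun c => (c, trieOf (tailsFor ws c))) := by
  induction ws using List.reverseRecOn with
  | nil => simp [trieOf, firstsOf, PyTrie.ch, childrenToList]
  | append_singleton ws w ih =>
      rw [trieOf_snoc, firstsOf_snoc]
      cases htr : trieOf ws with
      | mk ch =>
          have ihch : childrenToList ch =
              (firstsOf ws).map (fun c => (c, trieOf (tailsFor ws c))) := by
            simpa [htr, PyTrie.ch] using ih
          cases w with
          | nil =>
              have heq : ∀ c, tailsFor (ws ++ [[]]) c = tailsFor ws c := by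
                intro c; rw [tailsFor_snoc]; simp
              simp only [insertT, PyTrie.ch, heq, ihch]
          | cons c cs =>
              by_cases hc : c ∈ firstsOf ws
              · simp only [hc, if_pos, insertT, PyTrie.ch, childrenToList_updateChild, ihch]
                rw [updAssoc_map_mem _ _ _ _ (nodup_firstsOf ws) hc]
                refine List.map_congr_left ?_
                intro x hx
                rw [tailsFor_snoc]
                by_cases hxc : x = c
                · subst hxc
                  simp [trieOf_snoc]
                · have hb : ¬ (c == x) = true := by simp [Ne.symm hxc]
                  simp [hxc, hb]
              · simp only [hc, if_neg, not_false_iff, insertT, PyTrie.ch,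
                  childrenToList_updateChild, ihch]
                rw [updAssoc_map_not_mem _ _ _ _ hc, List.map_append]
                congr 1
                · refine List.map_congr_left ?_
                  intro x hx
                  have hxc : x ≠ c := fun he => hc (he ▸ hx)
                  have hb : ¬ (c == x) = true := by simp [Ne.symm hxc]
                  rw [tailsFor_snoc]
                  simp [hb]
                · simp [List.map, tailsFor_snoc, tailsFor_not_mem ws c hc, trieOf]

theorem anyNot_eq_any (ch : PyChildren) (bad : Bool) :
    anyNot ch bad = (childrenToList ch).any (fun p => !canDo p.2 bad) := by
  cases ch with
  | nil => simp [anyNot, childrenToList]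
  | cons c t rest =>
      have ih := anyNot_eq_any rest bad
      by_cases h : canDo t bad <;> simp [anyNot, childrenToList, h, ih]

lemma canDo_mk (ch : PyChildren) (bad : Bool) :
    canDo (.mk ch) bad =
      if childrenToList ch = [] then bad
      else (childrenToList ch).any (fun p => !canDo p.2 bad) := by
  cases ch with
  | nil => simp [canDo, childrenToList]
  | cons c t rest => simp [canDo, childrenToList, anyNot_eq_any]

-- main bridge: B's one DFS = A's two trie traversals
lemma solve_eq_canDo (ws : List (List Char)) :
    solve ws = (canDo (trieOf ws) false, canDo (trieOf ws) true) := by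
  have H : ∀ (n : Nat) (ws : List (List Char)), totalLen ws < n →
      solve ws = (canDo (trieOf ws) false, canDo (trieOf ws) true) := by
    intro n
    induction n with
    | zero => intro ws h; omega
    | succ n ih =>
        intro ws hlt
        rw [solve]
        cases htr : trieOf ws with
        | mk ch =>
            have hch : childrenToList ch =
                (firstsOf ws).map (fun c => (c, trieOf (tailsFor ws c))) := by
              simpa [htr, PyTrie.ch] using children_trieOf ws
            by_cases hfe : firstsOf ws = []
            · simp [hfe, canDo_mk, hch]
            · simp only [hfe, if_neg, not_false_iff]
              have hmap : (firstsOf ws).attach.map (fun c => solve (tailsFor ws c.1)) =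
                  (firstsOf ws).map (fun c => (canDo (trieOf (tailsFor ws c)) false,
                    canDo (trieOf (tailsFor ws c)) true)) := by
                have h1 : (firstsOf ws).attach.map (fun c => solve (tailsFor ws c.1)) =
                    (firstsOf ws).map (fun c => solve (tailsFor ws c)) := by simp
                rw [h1]
                refine List.map_congr_left ?_
                intro c hc
                exact ih _ (by have := totalLen_tailsFor_lt ws c hc; omega)
              rw [hmap, canDo_mk, canDo_mk, hch]
              have hne : ¬ ((firstsOf ws).map (fun c => (c, trieOf (tailsFor ws c))) = []) := by
                simp [hfe]
              simp only [hne, if_neg, not_false_iff]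
              simp [List.any_map, Function.comp_def]
  exact H (totalLen ws + 1) ws (Nat.lt_succ_self _)

-- ===== VERDICT (by name: the statement is the Claim_ definition above) =====
theorem label_graph_spec : Claim_equal_label_graph := by
  intro words k _
  unfold Spec_label_graph label_graph label_graph_alt
  have hfold : words.foldl (fun t w => insertT t w.toList) (.mk .nil) =
      trieOf (words.map String.toList) := by
    simp [trieOf, List.foldl_map]
  rw [hfold, solve_eq_canDo]
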